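-- pv_equiv track=rewrite | github.com/yichang1983/work | Topology-10.py | extract_nodes_from_edges
-- ===== SOURCE A (Python) =====
-- from typing import List, Tuple, Set, Dict
--
-- def extract_nodes_from_edges(edges_list: List[Tuple[str, str, str]]):
--     """
--     從 edge 列表抓出所有節點，並依 CFW/FSW/ASW 分類。
--     """
--     cfw_nodes = set()
--     fsw_nodes = set()
--     asw_nodes = set()
--
--     for left, right, _ in edges_list:
--         if "CFW" in left:
--             cfw_nodes.add(left)
--         if "CFW" in right:
--             cfw_nodes.add(right)
--
--         if "FSW" in left:
--             fsw_nodes.add(left)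
--         if "FSW" in right:
--             fsw_nodes.add(right)
--
--         if "ASW" in left:
--             asw_nodes.add(left)
--         if "ASW" in right:
--             asw_nodes.add(right)
--
--     return cfw_nodes, fsw_nodes, asw_nodes
-- ===== SOURCE B (Python) =====
-- def extract_nodes_from_edges(edges_list):
--     """
--     從 edge 列表抓出所有節點，並依 CFW/FSW/ASW 分類。
--     """
--     all_nodes = set()
--     for left, right, _ in edges_list:
--         all_nodes.add(left)
--         all_nodes.add(right)
--
--     cfw_nodes = {n for n in all_nodes if "CFW" in n}
--     fsw_nodes = {n for n in all_nodes if "FSW" in n}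
--     asw_nodes = {n for n in all_nodes if "ASW" in n}
--     return cfw_nodes, fsw_nodes, asw_nodes
-- ===== Notes on version B (the rewrite author's own statement) =====
-- stated objective: simpler
-- what changed: B first flattens all edges into one set of endpoint nodes in a single pass, then derives each of the three result sets as an independent comprehension filtering that set on its substring, instead of A's six interleaved per-edge membership tests and adds.
import Mathlib
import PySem

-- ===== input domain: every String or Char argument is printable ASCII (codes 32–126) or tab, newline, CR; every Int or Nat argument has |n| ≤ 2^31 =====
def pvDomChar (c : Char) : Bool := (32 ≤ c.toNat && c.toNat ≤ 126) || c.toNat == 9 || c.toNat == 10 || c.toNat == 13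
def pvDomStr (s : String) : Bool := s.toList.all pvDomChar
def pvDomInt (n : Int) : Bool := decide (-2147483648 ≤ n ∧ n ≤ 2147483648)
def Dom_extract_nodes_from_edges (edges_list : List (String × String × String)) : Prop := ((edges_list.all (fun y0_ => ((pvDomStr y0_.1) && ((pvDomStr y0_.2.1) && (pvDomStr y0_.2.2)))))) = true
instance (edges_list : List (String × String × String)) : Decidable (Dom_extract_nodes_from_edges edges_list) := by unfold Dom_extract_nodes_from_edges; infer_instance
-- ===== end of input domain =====

-- B flattens the edges into one set of endpoints, then filters it three times;
-- objective: simpler (same return value; no side effects involved).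

-- ===== PORT A =====
def extract_nodes_from_edges (edges_list : List (String × String × String)) :
    List String × List String × List String :=
  edges_list.foldl
    (fun (st : PySem.Set String × PySem.Set String × PySem.Set String) e =>
      let left := e.1
      let right := e.2.1
      let cfw := if PySem.Str.isIn "CFW" left then PySem.Set.add st.1 left else st.1
      let cfw := if PySem.Str.isIn "CFW" right then PySem.Set.add cfw right else cfw
      let fsw := if PySem.Str.isIn "FSW" left then PySem.Set.add st.2.1 left else st.2.1
      let fsw := if PySem.Str.isIn "FSW" right then PySem.Set.add fsw right else fsw
      let asw := if PySem.Str.isIn "ASW" left then PySem.Set.add st.2.2 left else st.2.2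
      let asw := if PySem.Str.isIn "ASW" right then PySem.Set.add asw right else asw
      (cfw, fsw, asw))
    (PySem.Set.empty, PySem.Set.empty, PySem.Set.empty)

-- ===== PORT B =====
def extract_nodes_from_edges_alt (edges_list : List (String × String × String)) :
    List String × List String × List String :=
  let all_nodes : PySem.Set String :=
    edges_list.foldl
      (fun (s : PySem.Set String) e => PySem.Set.add (PySem.Set.add s e.1) e.2.1)
      PySem.Set.empty
  (all_nodes.filter (fun n => PySem.Str.isIn "CFW" n),
   all_nodes.filter (fun n => PySem.Str.isIn "FSW" n),
   all_nodes.filter (fun n => PySem.Str.isIn "ASW" n))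

-- ===== PRECONDITION & SPEC =====
def Spec_extract_nodes_from_edges (edges_list : List (String × String × String)) (out : List String × List String × List String) : Prop := out = extract_nodes_from_edges_alt edges_list
instance (edges_list : List (String × String × String)) (out : List String × List String × List String) : Decidable (Spec_extract_nodes_from_edges edges_list out) := by unfold Spec_extract_nodes_from_edges; infer_instance

-- ===== CLAIM (what is proved, stated in full; the proofs are below) =====
def Claim_equal_extract_nodes_from_edges : Prop := ∀ (edges_list : List (String × String × String)), Dom_extract_nodes_from_edges edges_list → Spec_extract_nodes_from_edges edges_list (extract_nodes_from_edges edges_list)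

-- ===== LEMMAS AND PROOFS =====

-- Conditionally adding x to a filtered set = filtering after adding x to the underlying set.
theorem filter_add_step (all : List String) (x : String) (p : String → Bool) :
    (if p x then PySem.Set.add (all.filter p) x else all.filter p)
      = (PySem.Set.add all x).filter p := by
  by_cases hmem : x ∈ all
  · have h1 : PySem.Set.add all x = all := by
      simp [PySem.Set.add, PySem.Set.contains, hmem]
    rw [h1]
    by_cases hp : p x
    · have : x ∈ all.filter p := List.mem_filter.mpr ⟨hmem, hp⟩
      simp [hp, PySem.Set.add, PySem.Set.contains, this]
    · simp [hp]
  · have h1 : PySem.Set.add all x = all ++ [x] := by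
      simp [PySem.Set.add, PySem.Set.contains, hmem]
    rw [h1, List.filter_append]
    by_cases hp : p x
    · have : x ∉ all.filter p := fun h => hmem (List.mem_filter.mp h).1
      simp [hp, PySem.Set.add, PySem.Set.contains, this]
    · simp [hp]

-- Loop invariant: A's three accumulators are the three filters of B's accumulated node set.
theorem loop_invariant (edges : List (String × String × String)) (all : List String) :
    edges.foldl
      (fun (st : PySem.Set String × PySem.Set String × PySem.Set String) e =>
        let left := e.1
        let right := e.2.1
        let cfw := if PySem.Str.isIn "CFW" left then PySem.Set.add st.1 left else st.1
        let cfw := if PySem.Str.isIn "CFW" right then PySem.Set.add cfw right else cfw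
        let fsw := if PySem.Str.isIn "FSW" left then PySem.Set.add st.2.1 left else st.2.1
        let fsw := if PySem.Str.isIn "FSW" right then PySem.Set.add fsw right else fsw
        let asw := if PySem.Str.isIn "ASW" left then PySem.Set.add st.2.2 left else st.2.2
        let asw := if PySem.Str.isIn "ASW" right then PySem.Set.add asw right else asw
        (cfw, fsw, asw))
      (all.filter (fun n => PySem.Str.isIn "CFW" n),
       all.filter (fun n => PySem.Str.isIn "FSW" n),
       all.filter (fun n => PySem.Str.isIn "ASW" n))
    =
    (let all' := edges.foldl
        (fun (s : PySem.Set String) e => PySem.Set.add (PySem.Set.add s e.1) e.2.1) all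
     (all'.filter (fun n => PySem.Str.isIn "CFW" n),
      all'.filter (fun n => PySem.Str.isIn "FSW" n),
      all'.filter (fun n => PySem.Str.isIn "ASW" n))) := by
  induction edges generalizing all with
  | nil => simp
  | cons e rest ih =>
    simp only [List.foldl_cons]
    rw [filter_add_step all e.1, filter_add_step (PySem.Set.add all e.1) e.2.1,
        filter_add_step all e.1, filter_add_step (PySem.Set.add all e.1) e.2.1,
        filter_add_step all e.1, filter_add_step (PySem.Set.add all e.1) e.2.1]
    exact ih (PySem.Set.add (PySem.Set.add all e.1) e.2.1)

-- ===== VERDICT (by name: the statement is the Claim_ definition above) =====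
theorem extract_nodes_from_edges_spec : Claim_equal_extract_nodes_from_edges := by
  intro edges _
  show extract_nodes_from_edges edges = extract_nodes_from_edges_alt edges
  unfold extract_nodes_from_edges extract_nodes_from_edges_alt
  have h := loop_invariant edges []
  simpa [PySem.Set.empty] using h
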